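-- pv_equiv track=rewrite | github.com/GDSC-SCH/Algorithm-Study | 04_이남준/week_03/2108.py | bindo
-- ===== SOURCE A (Python) =====
-- def bindo(num_list: list) -> int:
--     result = {}
--     for i in num_list:
--         if i not in result.keys():
--             result[i] = 1
--         else:
--             result[i] += 1
--     result = sorted(result.items(), reverse=True, key=lambda item: item[1])
--     if len(result) == 1:
--         return result[0][0]
--     if result[0][1] == result[1][1]:
--         return result[1][0]
--     else:
--         return result[0][0]
-- ===== SOURCE B (Python) =====
-- def bindo(num_list: list) -> int:
--     counts = {}
--     for i in num_list:
--         if i not in counts: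
--             counts[i] = 1
--         else:
--             counts[i] += 1
--     items = list(counts.items())
--     max_count = max(c for _, c in items)
--     maxed = [v for v, c in items if c == max_count]
--     return maxed[1] if len(maxed) >= 2 else maxed[0]
-- ===== Notes on version B (the rewrite author's own statement) =====
-- stated objective: simpler
-- what changed: B replaces A's full stable sort by count and top-two inspection with a single max-of-counts scan plus an insertion-order filter of the maximal keys, picking the second one if there are at least two.
import Mathlib
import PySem

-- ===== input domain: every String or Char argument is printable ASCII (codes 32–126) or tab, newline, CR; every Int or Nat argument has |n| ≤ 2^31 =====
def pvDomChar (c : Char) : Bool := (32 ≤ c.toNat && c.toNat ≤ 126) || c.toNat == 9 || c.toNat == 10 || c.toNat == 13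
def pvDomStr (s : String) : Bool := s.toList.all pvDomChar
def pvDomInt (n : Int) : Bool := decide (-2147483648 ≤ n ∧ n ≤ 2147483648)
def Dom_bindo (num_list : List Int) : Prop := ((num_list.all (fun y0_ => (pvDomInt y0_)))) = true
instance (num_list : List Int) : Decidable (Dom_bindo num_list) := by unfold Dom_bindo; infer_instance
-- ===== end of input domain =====

-- B: one max-of-counts scan + insertion-order filter of the maximal keys, instead of A's
-- full stable sort by count and top-two inspection (objective: simpler).

-- ===== PORT A =====
-- the counting loop 'for i in num_list: if i not in result: result[i]=1 else: result[i]+=1',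
-- identical in both Pythons (result[i] += 1 read-then-write as insert of get+1)
def pvCount (num_list : List Int) : PySem.Dict Int Int :=
  num_list.foldl
    (fun r i =>
      if r.contains i = false then r.insert i 1
      else r.insert i (((r.get? i).getD 0) + 1))
    PySem.Dict.empty

def bindo (num_list : List Int) : Int :=
  let result := pvCount num_list
  let s := PySem.List.sorted result.items Prod.snd true
  -- result[0] / result[1]: pyGet?; on the empty list Python raises IndexError (excluded by Pre_)
  if s.length == 1 then ((PySem.List.pyGet? s 0).getD (0, 0)).1
  else if ((PySem.List.pyGet? s 0).getD (0, 0)).2 == ((PySem.List.pyGet? s 1).getD (0, 0)).2 then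
    ((PySem.List.pyGet? s 1).getD (0, 0)).1
  else
    ((PySem.List.pyGet? s 0).getD (0, 0)).1

-- ===== PORT B =====
def bindo_alt (num_list : List Int) : Int :=
  let items := (pvCount num_list).items
  -- max(c for _, c in items); on the empty list Python raises ValueError (excluded by Pre_)
  match PySem.List.max? (items.map Prod.snd) (fun c => c) with
  | none => 0
  | some max_count =>
    let maxed := (items.filter (fun it => it.2 == max_count)).map Prod.fst
    if 2 ≤ maxed.length then (PySem.List.pyGet? maxed 1).getD 0
    else (PySem.List.pyGet? maxed 0).getD 0

-- ===== PRECONDITION & SPEC =====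
-- Pre_ excludes only the empty list, on which A raises IndexError (and B raises ValueError).
def Pre_bindo (num_list : List Int) : Prop := num_list ≠ []
instance (num_list : List Int) : Decidable (Pre_bindo num_list) := by unfold Pre_bindo; infer_instance
def pvWitness_bindo : List Int := [1, 2, 2]

def Spec_bindo (num_list : List Int) (out : Int) : Prop := out = bindo_alt num_list
instance (num_list : List Int) (out : Int) : Decidable (Spec_bindo num_list out) := by unfold Spec_bindo; infer_instance

-- ===== CLAIM (what is proved, stated in full; the proofs are below) =====
def Claim_equal_bindo : Prop := ∀ (num_list : List Int), Dom_bindo num_list → Pre_bindo num_list → Spec_bindo num_list (bindo num_list)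

-- ===== LEMMAS AND PROOFS =====

-- inserting x into a key-descending list keeps the filter at any count value stable:
-- x's equals all sit before its insertion point
theorem pv_filter_insertBy (c : Int) (x : Int × Int) :
    ∀ (l : List (Int × Int)), l.Pairwise (fun a b => b.2 ≤ a.2) →
    (PySem.List.insertBy (fun a b => decide (b.2 < a.2)) x l).filter (fun y => y.2 == c) =
      l.filter (fun y => y.2 == c) ++ (if x.2 == c then [x] else []) := by
  intro l
  induction l with
  | nil =>
    intro _
    simp only [PySem.List.insertBy, List.filter_cons, List.filter_nil, List.nil_append]
  | cons y ys ih =>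
    intro hp
    rw [List.pairwise_cons] at hp
    by_cases h : y.2 < x.2
    · have hstep : PySem.List.insertBy (fun a b => decide (b.2 < a.2)) x (y :: ys) = x :: y :: ys := by
        simp [PySem.List.insertBy, h]
      rw [hstep]
      by_cases hx : x.2 = c
      · have hys : (y :: ys).filter (fun z => z.2 == c) = [] := by
          apply List.filter_eq_nil_iff.mpr
          intro z hz
          have hzle : z.2 ≤ y.2 := by
            rcases List.mem_cons.mp hz with rfl | hz'
            · exact le_refl _
            · exact hp.1 z hz'
          simp only [beq_iff_eq]
          omega
        rw [List.filter_cons_of_pos (by simp [hx]), hys]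
        simp [hx]
      · rw [List.filter_cons_of_neg (by simp [hx])]
        simp [hx]
    · have hstep : PySem.List.insertBy (fun a b => decide (b.2 < a.2)) x (y :: ys) =
          y :: PySem.List.insertBy (fun a b => decide (b.2 < a.2)) x ys := by
        simp [PySem.List.insertBy, h]
      rw [hstep, List.filter_cons, ih hp.2, List.filter_cons]
      by_cases hy : (y.2 == c) = true <;> simp [hy]

-- stability of the reverse sort by count: the sublist at any fixed count is unchanged
theorem pv_filter_sorted_rev (c : Int) (l : List (Int × Int)) :
    (PySem.List.sorted l Prod.snd true).filter (fun y => y.2 == c) =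
      l.filter (fun y => y.2 == c) := by
  induction l using List.reverseRecOn with
  | nil => rfl
  | append_singleton xs x ih =>
    have hfold := PySem.List.sorted_rev_eq_foldl_insertBy (xs ++ [x]) Prod.snd
    rw [hfold, List.foldl_append, List.foldl_cons, List.foldl_nil,
        ← PySem.List.sorted_rev_eq_foldl_insertBy xs Prod.snd]
    rw [pv_filter_insertBy c x _ (PySem.List.sorted_pairwise_rev xs Prod.snd)]
    rw [ih, List.filter_append, List.filter_cons, List.filter_nil]

-- each counting step can only grow the item list
theorem pv_count_step_len (r : PySem.Dict Int Int) (i : Int) :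
    r.items.length ≤
      (if r.contains i = false then r.insert i 1
       else r.insert i (((r.get? i).getD 0) + 1)).items.length := by
  split_ifs with h
  · rw [PySem.Dict.items_insert_of_not_contains r 1 h]
    simp
  · rw [PySem.Dict.items_insert_of_contains r _ (by simpa using h)]
    simp

theorem pv_count_fold_len (l : List Int) :
    ∀ (r : PySem.Dict Int Int), r.items.length ≤ (l.foldl
      (fun r i =>
        if r.contains i = false then r.insert i 1
        else r.insert i (((r.get? i).getD 0) + 1)) r).items.length := by
  induction l with
  | nil => intro r; simp
  | cons i t ih =>
    intro r
    exact le_trans (pv_count_step_len r i) (ih _)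

theorem pv_count_ne_nil (num_list : List Int) (h : num_list ≠ []) :
    (pvCount num_list).items ≠ [] := by
  cases num_list with
  | nil => exact absurd rfl h
  | cons i t =>
    unfold pvCount
    rw [List.foldl_cons]
    have hd0 : (if (PySem.Dict.empty : PySem.Dict Int Int).contains i = false
        then (PySem.Dict.empty : PySem.Dict Int Int).insert i 1
        else PySem.Dict.empty.insert i ((((PySem.Dict.empty : PySem.Dict Int Int).get? i).getD 0) + 1))
        = (PySem.Dict.empty : PySem.Dict Int Int).insert i 1 := by
      simp [PySem.Dict.contains_empty]
    rw [hd0]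
    intro hnil
    have hl := pv_count_fold_len t ((PySem.Dict.empty : PySem.Dict Int Int).insert i 1)
    rw [hnil] at hl
    rw [PySem.Dict.items_insert_of_not_contains _ 1 (by simp [PySem.Dict.contains_empty])] at hl
    simp at hl

-- the selection step: top-two of the stable descending sort = first/second maximal element
theorem pv_main (xs : List (Int × Int)) (hne : xs ≠ []) :
    (if (PySem.List.sorted xs Prod.snd true).length == 1 then
       ((PySem.List.pyGet? (PySem.List.sorted xs Prod.snd true) 0).getD (0, 0)).1
     else if ((PySem.List.pyGet? (PySem.List.sorted xs Prod.snd true) 0).getD (0, 0)).2 ==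
         ((PySem.List.pyGet? (PySem.List.sorted xs Prod.snd true) 1).getD (0, 0)).2 then
       ((PySem.List.pyGet? (PySem.List.sorted xs Prod.snd true) 1).getD (0, 0)).1
     else
       ((PySem.List.pyGet? (PySem.List.sorted xs Prod.snd true) 0).getD (0, 0)).1)
    =
    (match PySem.List.max? (xs.map Prod.snd) (fun c => c) with
     | none => 0
     | some max_count =>
       if 2 ≤ ((xs.filter (fun it => it.2 == max_count)).map Prod.fst).length then
         (PySem.List.pyGet? ((xs.filter (fun it => it.2 == max_count)).map Prod.fst) 1).getD 0
       else (PySem.List.pyGet? ((xs.filter (fun it => it.2 == max_count)).map Prod.fst) 0).getD 0) := by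
  cases hs : PySem.List.sorted xs Prod.snd true with
  | nil => exact absurd ((PySem.List.sorted_eq_nil_iff xs Prod.snd true).mp hs) hne
  | cons h t =>
    obtain ⟨m, hm⟩ : ∃ m, PySem.List.max? (xs.map Prod.snd) (fun c => c) = some m := by
      cases hmx : PySem.List.max? (xs.map Prod.snd) (fun c => c) with
      | none => exact absurd (by simpa using (PySem.List.max?_eq_none_iff (xs.map Prod.snd) (fun c => c)).mp hmx) hne
      | some m => exact ⟨m, rfl⟩
    have hhx : h ∈ xs := (PySem.List.mem_sorted xs Prod.snd true h).mp (hs ▸ List.mem_cons_self)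
    have hh_ge : ∀ y ∈ xs, y.2 ≤ h.2 := PySem.List.key_head_sorted_rev_ge xs Prod.snd hs
    have hmax' : ∀ y ∈ xs.map Prod.snd, y ≤ m := fun y hy => PySem.List.max?_isMax hm y hy
    have hm_eq : h.2 = m := by
      apply le_antisymm (hmax' h.2 (List.mem_map_of_mem hhx))
      obtain ⟨z, hz, hz2⟩ := List.mem_map.mp (PySem.List.max?_mem hm)
      exact hz2 ▸ hh_ge z hz
    have hfilt : xs.filter (fun y => y.2 == m) = (h :: t).filter (fun y => y.2 == m) := by
      rw [← hs, pv_filter_sorted_rev]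
    rw [hm]
    cases t with
    | nil =>
      have hf1 : xs.filter (fun y => y.2 == m) = [h] := by
        rw [hfilt]; simp [hm_eq]
      simp [hf1, PySem.List.pyGet?_zero_cons]
    | cons y t' =>
      have hpw : (h :: y :: t').Pairwise (fun a b => b.2 ≤ a.2) := by
        rw [← hs]; exact PySem.List.sorted_pairwise_rev xs Prod.snd
      have hlen : ((y :: t').length + 1 == 1) = false := by simp
      have g0 : PySem.List.pyGet? (h :: y :: t') (0 : Int) = some h :=
        PySem.List.pyGet?_zero_cons h (y :: t')
      have g1 : PySem.List.pyGet? (h :: y :: t') (1 : Int) = some y := by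
        simp only [PySem.List.pyGet?, PySem.List.pyIdx?]
        norm_num
      simp only [List.length_cons, hlen, Bool.false_eq_true, if_false, g0, g1, Option.getD_some]
      by_cases hy : y.2 = m
      · -- tie on the top count: A takes s[1], B the second maximal key in insertion order
        have hf2 : xs.filter (fun it => it.2 == m) = h :: y :: t'.filter (fun it => it.2 == m) := by
          rw [hfilt]; simp [hm_eq, hy]
        have hbeq : (h.2 == y.2) = true := by simp [hm_eq, hy]
        have g1' : PySem.List.pyGet? (h.1 :: y.1 :: (t'.filter (fun it => it.2 == m)).map Prod.fst) (1 : Int) = some y.1 := by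
          simp only [PySem.List.pyGet?, PySem.List.pyIdx?]
          norm_num
        have hlen2 : 2 ≤ ((t'.filter (fun it => it.2 == m)).map Prod.fst).length + 1 + 1 := by omega
        simp [hf2, hbeq, g1', hlen2]
      · -- unique top count: A takes s[0], B the single maximal key
        have hyt : ∀ z ∈ (y :: t'), ¬ (z.2 == m) = true := by
          intro z hz
          have hzy : z.2 ≤ y.2 := by
            rcases List.mem_cons.mp hz with rfl | hz'
            · exact le_refl _
            · exact (List.pairwise_cons.mp (List.pairwise_cons.mp hpw).2).1 z hz'
          have hym : y.2 ≤ h.2 := (List.pairwise_cons.mp hpw).1 y List.mem_cons_self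
          simp only [beq_iff_eq]
          omega
        have hf3 : xs.filter (fun it => it.2 == m) = [h] := by
          rw [hfilt, List.filter_cons_of_pos (by simp [hm_eq]),
              List.filter_eq_nil_iff.mpr hyt]
        have hbeq : (h.2 == y.2) = false := by
          simp only [beq_eq_false_iff_ne, ne_eq, hm_eq]
          exact fun e => hy e.symm
        simp [hf3, hbeq, PySem.List.pyGet?_zero_cons]

-- ===== VERDICT (by name: the statement is the Claim_ definition above) =====
theorem bindo_spec : Claim_equal_bindo := by
  intro num_list _ hpre
  unfold Spec_bindo bindo bindo_alt
  exact pv_main (pvCount num_list).items (pv_count_ne_nil num_list hpre)
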